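-- pv_equiv track=rewrite | github.com/CiaranGruber/CP1404practicals | prac_04/add_memberwise.py | add_memberwise
-- ===== SOURCE A (Python) =====
-- def add_memberwise(list_1, list_2):
--     """Merges 2 lists together by adding each of their respective indexes together"""
--     new_list = []
--     for x in range(min(len(list_1), len(list_2))):
--         new_list.append(list_1[x] + list_2[x])
--     if len(list_1) > len(list_2):
--         for x in range(len(list_2), len(list_1)):
--             new_list.append(list_1[x])
--     else:
--         for x in range(len(list_1), len(list_2)):
--             new_list.append(list_2[x])
--     return new_list
-- ===== SOURCE B (Python) =====
-- def add_memberwise(list_1, list_2):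
--     """Merges 2 lists together by adding each of their respective indexes together"""
--     it_1, it_2 = iter(list_1), iter(list_2)
--     _done = object()
--     new_list = []
--     while True:
--         a = next(it_1, _done)
--         b = next(it_2, _done)
--         if a is _done and b is _done:
--             return new_list
--         if a is _done:
--             new_list.append(b)
--         elif b is _done:
--             new_list.append(a)
--         else:
--             new_list.append(a + b)
-- ===== Notes on version B (the rewrite author's own statement) =====
-- stated objective: alternative
-- what changed: Replaces A's length computations, three index-driven range loops and the if/else choosing the longer tail by a single while-loop merge over two iterators with an exhaustion sentinel: each step consumes at most one element from each side, appending the sum or the surviving element.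
import Mathlib
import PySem

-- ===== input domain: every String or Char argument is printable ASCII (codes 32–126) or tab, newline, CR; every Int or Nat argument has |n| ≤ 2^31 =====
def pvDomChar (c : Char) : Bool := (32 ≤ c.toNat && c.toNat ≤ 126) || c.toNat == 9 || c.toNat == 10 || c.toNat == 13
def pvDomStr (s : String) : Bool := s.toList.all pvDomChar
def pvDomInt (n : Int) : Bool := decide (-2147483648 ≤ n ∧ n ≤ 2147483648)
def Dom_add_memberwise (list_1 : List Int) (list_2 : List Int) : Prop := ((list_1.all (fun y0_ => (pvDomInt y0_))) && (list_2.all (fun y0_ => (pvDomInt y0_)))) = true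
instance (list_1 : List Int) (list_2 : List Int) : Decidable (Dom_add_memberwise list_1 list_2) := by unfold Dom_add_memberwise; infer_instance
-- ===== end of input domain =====

-- B replaces A's length/index bookkeeping (three range loops and an if/else over the
-- longer list) by a single two-iterator merge loop with an exhaustion sentinel: alternative.

-- ===== PORT A =====
-- Loop indices are provably in range, so list_1[x]/list_2[x] never raises; ported as pyGetD.
def add_memberwise (list_1 : List Int) (list_2 : List Int) : List Int :=
  let new_list : List Int := []
  let new_list :=
    (PySem.List.pyRange 0 (min (list_1.length : Int) (list_2.length : Int)) 1).foldl
      (fun acc x => acc ++ [PySem.List.pyGetD list_1 x 0 + PySem.List.pyGetD list_2 x 0]) new_list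
  if (list_1.length : Int) > (list_2.length : Int) then
    (PySem.List.pyRange (list_2.length : Int) (list_1.length : Int) 1).foldl
      (fun acc x => acc ++ [PySem.List.pyGetD list_1 x 0]) new_list
  else
    (PySem.List.pyRange (list_1.length : Int) (list_2.length : Int) 1).foldl
      (fun acc x => acc ++ [PySem.List.pyGetD list_2 x 0]) new_list

-- ===== PORT B =====
-- Python iterators become the unconsumed suffixes it_1/it_2; next(it, _done) is the
-- head/tail split, the sentinel branch structure is the four-way match.
def pvMergeLoop (it_1 : List Int) (it_2 : List Int) (new_list : List Int) : List Int :=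
  match it_1, it_2 with
  | [], [] => new_list
  | [], b :: t2 => pvMergeLoop [] t2 (new_list ++ [b])
  | a :: t1, [] => pvMergeLoop t1 [] (new_list ++ [a])
  | a :: t1, b :: t2 => pvMergeLoop t1 t2 (new_list ++ [a + b])
termination_by it_1.length + it_2.length

def add_memberwise_alt (list_1 : List Int) (list_2 : List Int) : List Int :=
  pvMergeLoop list_1 list_2 []

-- ===== PRECONDITION & SPEC =====
def Spec_add_memberwise (list_1 : List Int) (list_2 : List Int) (out : List Int) : Prop := out = add_memberwise_alt list_1 list_2
instance (list_1 : List Int) (list_2 : List Int) (out : List Int) : Decidable (Spec_add_memberwise list_1 list_2 out) := by unfold Spec_add_memberwise; infer_instance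

-- ===== CLAIM (what is proved, stated in full; the proofs are below) =====
def Claim_equal_add_memberwise : Prop := ∀ (list_1 : List Int) (list_2 : List Int), Dom_add_memberwise list_1 list_2 → Spec_add_memberwise list_1 list_2 (add_memberwise list_1 list_2)

-- ===== LEMMAS AND PROOFS =====

-- Characterisation of B: overlap of sums, then the tail of whichever list is longer.
-- Characterisation of B's merge loop.
lemma mergeLoop_char : ∀ (l1 l2 acc : List Int),
    pvMergeLoop l1 l2 acc
      = acc ++ ((l1.zip l2).map (fun p => p.1 + p.2)
        ++ (l1.drop (min l1.length l2.length) ++ l2.drop (min l1.length l2.length))) := by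
  intro l1
  induction l1 with
  | nil =>
    intro l2
    induction l2 with
    | nil => intro acc; simp [pvMergeLoop]
    | cons b u ih2 => intro acc; simp [pvMergeLoop, ih2]
  | cons a t ih =>
    intro l2 acc
    cases l2 with
    | nil =>
      have h := ih [] (acc ++ [a])
      simp [pvMergeLoop, h]
    | cons b u =>
      simp [pvMergeLoop, ih u, Nat.succ_min_succ]

lemma alt_eq : ∀ (l1 l2 : List Int),
    add_memberwise_alt l1 l2
      = (l1.zip l2).map (fun p => p.1 + p.2)
        ++ (l1.drop (min l1.length l2.length) ++ l2.drop (min l1.length l2.length)) := by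
  intro l1 l2
  simp [add_memberwise_alt, mergeLoop_char]

-- The overlap built by index equals the zip-built overlap.
lemma overlap_eq : ∀ (l1 l2 : List Int),
    (List.range (min l1.length l2.length)).map (fun k => l1.getD k 0 + l2.getD k 0)
      = (l1.zip l2).map (fun p => p.1 + p.2) := by
  intro l1
  induction l1 with
  | nil => intro l2; simp
  | cons a t ih =>
    intro l2
    cases l2 with
    | nil => simp
    | cons b u =>
      simp only [List.length_cons, Nat.succ_min_succ, List.range_succ_eq_map,
        List.map_cons, List.map_map, List.zip_cons_cons, List.getD_cons_zero]
      have h0 := ih u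
      simp only [List.getD_eq_getElem?_getD] at h0
      simp [Function.comp_def, h0]

-- A tail built by index from position m equals drop m.
lemma tail_eq : ∀ (l : List Int) (m : Nat),
    (List.range (l.length - m)).map (fun k => l.getD (m + k) 0) = l.drop m := by
  intro l
  induction l with
  | nil => intro m; simp
  | cons a t ih =>
    intro m
    cases m with
    | zero =>
      simp only [List.length_cons, Nat.sub_zero, List.range_succ_eq_map, List.map_cons,
        List.map_map, List.drop_zero]
      have h0 := ih 0
      simp only [Nat.sub_zero, Nat.zero_add, List.drop_zero, List.getD_eq_getElem?_getD] at h0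
      simp [Function.comp_def, h0]
    | succ m =>
      simp only [List.length_cons, Nat.succ_sub_succ, List.drop_succ_cons]
      rw [← ih m]
      refine List.map_congr_left ?_
      intro k _
      simp [Nat.succ_add]

-- Reduce one of A's append-loops over pyRange a b 1 (a b : Nat casts) to a map over List.range.
lemma loop_eq (f : Int → Int) (a b : Nat) (init : List Int) :
    (PySem.List.pyRange (a : Int) (b : Int) 1).foldl (fun acc x => acc ++ [f x]) init
      = init ++ (List.range (b - a)).map (fun k => f ((a : Int) + (k : Nat))) := by
  rw [PySem.List.foldl_append_singleton_eq_map, PySem.List.pyRange_one]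
  have : ((b : Int) - (a : Int)).toNat = b - a := by omega
  rw [this, List.map_map]
  rfl

theorem add_memberwise_spec : Claim_equal_add_memberwise := by
  intro l1 l2 _
  show add_memberwise l1 l2 = add_memberwise_alt l1 l2
  rw [alt_eq]
  unfold add_memberwise
  have hmin : (min (l1.length : Int) (l2.length : Int)) = ((min l1.length l2.length : Nat) : Int) := by
    omega
  have hover :
      (PySem.List.pyRange 0 (min (l1.length : Int) (l2.length : Int)) 1).foldl
        (fun acc x => acc ++ [PySem.List.pyGetD l1 x 0 + PySem.List.pyGetD l2 x 0]) []
        = (l1.zip l2).map (fun p => p.1 + p.2) := by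
    rw [hmin]
    have := loop_eq (fun x => PySem.List.pyGetD l1 x 0 + PySem.List.pyGetD l2 x 0)
      0 (min l1.length l2.length) []
    simp only [Nat.cast_zero] at this
    rw [this, ← overlap_eq l1 l2]
    simp [PySem.List.pyGetD_natCast]
  by_cases h : (l2.length : Int) < (l1.length : Int)
  · simp only [gt_iff_lt, h, if_pos, hover]
    rw [loop_eq (fun x => PySem.List.pyGetD l1 x 0) l2.length l1.length]
    have hm : min l1.length l2.length = l2.length := by omega
    rw [hm]
    have hd2 : l2.drop l2.length = ([] : List Int) := by simp
    rw [hd2, List.append_nil]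
    refine congrArg (fun xs => (l1.zip l2).map (fun p => p.1 + p.2) ++ xs) ?_
    rw [← tail_eq l1 l2.length]
    refine List.map_congr_left ?_
    intro k _
    rw [show ((l2.length : Int) + (k : Nat)) = ((l2.length + k : Nat) : Int) by push_cast; ring,
      PySem.List.pyGetD_natCast]
  · simp only [gt_iff_lt, h, if_false, hover]
    rw [loop_eq (fun x => PySem.List.pyGetD l2 x 0) l1.length l2.length]
    have hm : min l1.length l2.length = l1.length := by omega
    rw [hm]
    have hd1 : l1.drop l1.length = ([] : List Int) := by simp
    rw [hd1, List.nil_append]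
    refine congrArg (fun xs => (l1.zip l2).map (fun p => p.1 + p.2) ++ xs) ?_
    rw [← tail_eq l2 l1.length]
    refine List.map_congr_left ?_
    intro k _
    rw [show ((l1.length : Int) + (k : Nat)) = ((l1.length + k : Nat) : Int) by push_cast; ring,
      PySem.List.pyGetD_natCast]
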